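-- pv_equiv track=rewrite | github.com/seanwevans/KenKenSolver | tester.py | tikz_box
-- ===== SOURCE A (Python) =====
-- def box_coords(coordinate):
-- 		# Calculate tikz coordinates for a box around one local coordinate
-- 		(x,y) = coordinate
-- 		p = 2 * (x - 1)
-- 		q = 2 * (5 - y)
-- 		return([[(p,q), (p,q-2)], [(p,q-2),(p+2,q-2)], [(p+2,q-2),(p+2,q)], [(p+2,q),(p,q)]])
--
-- def tikz_box(coordinates):
-- 	a = []
-- 	for c in coordinates:
-- 		# c = (1,1)
-- 		b = box_coords(c)
-- 		# b =  [[(0,8),(0,6)],[(0,6),(2,6)],[(2,6),(2,8)],[(2,8),(0,8)]]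
-- 		for d in b:
-- 			# d = [(0,8),(0,6)]
-- 			if d in a or d[::-1] in a:
-- 				try:
-- 					a.remove(d)
-- 				except:
-- 					a.remove(d[::-1])
-- 			else:
-- 				a.append(d)
-- 	return(a)
-- ===== SOURCE B (Python) =====
-- def box_coords(coordinate):
--     # Calculate tikz coordinates for a box around one local coordinate
--     (x, y) = coordinate
--     p = 2 * (x - 1)
--     q = 2 * (5 - y)
--     return [[(p, q), (p, q - 2)], [(p, q - 2), (p + 2, q - 2)],
--             [(p + 2, q - 2), (p + 2, q)], [(p + 2, q), (p, q)]]
--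
--
-- def canon(d):
--     # orientation-independent key of a two-point edge
--     p, q = d
--     return (p, q) if p <= q else (q, p)
--
--
-- def tikz_box(coordinates):
--     # Single flat edge list; keep edges whose undirected multiplicity is odd,
--     # each with the orientation of its last occurrence, ordered by that
--     # last occurrence (scan in reverse, then reverse the result).
--     edges = [d for c in coordinates for d in box_coords(c)]
--     out = []
--     seen = []
--     for d in reversed(edges):
--         k = canon(d)
--         if k not in seen:
--             seen.append(k)
--             if sum(1 for e in edges if canon(e) == k) % 2 == 1:
--                 out.append(d)
--     out.reverse()
--     return out
-- ===== Notes on version B (the rewrite author's own statement) =====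
-- stated objective: alternative
-- what changed: A maintains a running edge list and toggles each new box edge in or out by membership test and remove; B instead flattens all box edges once, decides each edge's fate by the parity of its orientation-independent count, and emits survivors by a single reverse scan that keeps the last occurrence's orientation and position.
import Mathlib
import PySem

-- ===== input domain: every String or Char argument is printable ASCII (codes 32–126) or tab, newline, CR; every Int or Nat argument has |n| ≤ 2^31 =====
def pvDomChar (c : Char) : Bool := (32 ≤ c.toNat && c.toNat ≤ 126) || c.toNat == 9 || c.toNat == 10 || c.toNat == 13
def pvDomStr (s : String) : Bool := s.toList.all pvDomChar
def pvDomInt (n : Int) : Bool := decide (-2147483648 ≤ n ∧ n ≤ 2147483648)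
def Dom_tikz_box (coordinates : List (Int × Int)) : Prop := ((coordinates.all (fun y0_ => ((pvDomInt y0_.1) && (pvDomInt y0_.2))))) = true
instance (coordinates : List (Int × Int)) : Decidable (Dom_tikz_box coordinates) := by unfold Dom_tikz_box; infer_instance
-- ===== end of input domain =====

-- B replaces A's quadratic toggle list (membership test + remove per edge) by one flat edge
-- list scanned in reverse with an undirected-parity count per edge; same return value.

-- ===== PORT A =====
def box_coords (c : Int × Int) : List (List (Int × Int)) :=
  let p := 2 * (c.1 - 1)
  let q := 2 * (5 - c.2)
  [[(p, q), (p, q - 2)], [(p, q - 2), (p + 2, q - 2)],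
   [(p + 2, q - 2), (p + 2, q)], [(p + 2, q), (p, q)]]

-- body of A's inner loop: toggle edge d in the accumulator a
def tikz_toggle (a : List (List (Int × Int))) (d : List (Int × Int)) : List (List (Int × Int)) :=
  if d ∈ a ∨ d.reverse ∈ a then
    -- Python: try a.remove(d) except: a.remove(d[::-1]) — remove first equal element
    if d ∈ a then a.erase d else a.erase d.reverse
  else a ++ [d]

def tikz_box (coordinates : List (Int × Int)) : List (List (Int × Int)) :=
  coordinates.foldl (fun a c => (box_coords c).foldl tikz_toggle a) []

-- ===== PORT B =====
-- canon(d): orientation-independent key of a two-point edge (Python tuple ≤ is lexicographic)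
def canon (d : List (Int × Int)) : (Int × Int) × (Int × Int) :=
  match d with
  | [p, q] => if p.1 < q.1 ∨ (p.1 = q.1 ∧ p.2 ≤ q.2) then (p, q) else (q, p)
  | _ => ((0, 0), (0, 0))

-- body of B's loop over reversed(edges), state (out, seen)
def tikz_step (edges : List (List (Int × Int)))
    (st : List (List (Int × Int)) × List ((Int × Int) × (Int × Int)))
    (d : List (Int × Int)) : List (List (Int × Int)) × List ((Int × Int) × (Int × Int)) :=
  let k := canon d
  if k ∈ st.2 then st
  else ((if edges.countP (fun e => canon e == k) % 2 == 1 then st.1 ++ [d] else st.1),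
        st.2 ++ [k])

def tikz_box_alt (coordinates : List (Int × Int)) : List (List (Int × Int)) :=
  let edges := coordinates.flatMap box_coords
  (edges.reverse.foldl (tikz_step edges) ([], [])).1.reverse

-- ===== PRECONDITION & SPEC =====
def Spec_tikz_box (coordinates : List (Int × Int)) (out : List (List (Int × Int))) : Prop := out = tikz_box_alt coordinates
instance (coordinates : List (Int × Int)) (out : List (List (Int × Int))) : Decidable (Spec_tikz_box coordinates out) := by unfold Spec_tikz_box; infer_instance

-- ===== CLAIM (what is proved, stated in full; the proofs are below) =====
def Claim_equal_tikz_box : Prop := ∀ (coordinates : List (Int × Int)), Dom_tikz_box coordinates → Spec_tikz_box coordinates (tikz_box coordinates)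

-- ===== LEMMAS AND PROOFS =====

lemma tikz_step_skip (L : List (List (Int × Int)))
    (st : List (List (Int × Int)) × List ((Int × Int) × (Int × Int)))
    (d : List (Int × Int)) (h : canon d ∈ st.2) : tikz_step L st d = st := by
  simp [tikz_step, h]

lemma tikz_step_go (L : List (List (Int × Int)))
    (st : List (List (Int × Int)) × List ((Int × Int) × (Int × Int)))
    (d : List (Int × Int)) (h : canon d ∉ st.2) :
    tikz_step L st d =
      ((if L.countP (fun e => canon e == canon d) % 2 == 1 then st.1 ++ [d] else st.1),
       st.2 ++ [canon d]) := by
  simp [tikz_step, h]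

-- accumulated output splits off
lemma tikz_step_go_nil (L : List (List (Int × Int)))
    (s : List ((Int × Int) × (Int × Int)))
    (d : List (Int × Int)) (h : canon d ∉ s) :
    tikz_step L ([], s) d =
      ((if L.countP (fun e => canon e == canon d) % 2 == 1 then [d] else []),
       s ++ [canon d]) := by
  simp [tikz_step, h]

lemma foldl_step_out (L es : List (List (Int × Int))) (o : List (List (Int × Int)))
    (s : List ((Int × Int) × (Int × Int))) :
    es.foldl (tikz_step L) (o, s) =
      (o ++ (es.foldl (tikz_step L) ([], s)).1, (es.foldl (tikz_step L) ([], s)).2) := by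
  induction es generalizing o s with
  | nil => simp
  | cons d es ih =>
    simp only [List.foldl_cons]
    by_cases hk : canon d ∈ s
    · rw [tikz_step_skip L (o, s) d hk, tikz_step_skip L ([], s) d hk]
      exact ih o s
    · rw [tikz_step_go L (o, s) d hk, tikz_step_go_nil L s d hk]
      simp only
      by_cases hc : (L.countP (fun e => canon e == canon d) % 2 == 1) = true
      · simp only [hc, if_pos]
        rw [ih (o ++ [d]) (s ++ [canon d]), ih [d] (s ++ [canon d])]
        simp
      · simp only [hc, if_neg, Bool.false_eq_true, not_false_iff]
        rw [ih o (s ++ [canon d])]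

-- the fold depends on the seen list only through membership
lemma foldl_step_seen_congr (L es : List (List (Int × Int)))
    (s₁ s₂ : List ((Int × Int) × (Int × Int))) (h : ∀ x, x ∈ s₁ ↔ x ∈ s₂) :
    (es.foldl (tikz_step L) ([], s₁)).1 = (es.foldl (tikz_step L) ([], s₂)).1 ∧
    (∀ x, x ∈ (es.foldl (tikz_step L) ([], s₁)).2 ↔ x ∈ (es.foldl (tikz_step L) ([], s₂)).2) := by
  induction es generalizing s₁ s₂ with
  | nil => exact ⟨rfl, h⟩
  | cons d es ih =>
    simp only [List.foldl_cons]
    by_cases hk : canon d ∈ s₁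
    · have hk₂ : canon d ∈ s₂ := (h _).mp hk
      rw [tikz_step_skip L ([], s₁) d hk, tikz_step_skip L ([], s₂) d hk₂]
      exact ih s₁ s₂ h
    · have hk₂ : canon d ∉ s₂ := fun hh => hk ((h _).mpr hh)
      have h' : ∀ x, x ∈ s₁ ++ [canon d] ↔ x ∈ s₂ ++ [canon d] := by
        intro x; simp [h x]
      rw [tikz_step_go_nil L (s₁) d hk, tikz_step_go_nil L (s₂) d hk₂]
      obtain ⟨h1, h2⟩ := ih _ _ h'
      by_cases hc : (L.countP (fun e => canon e == canon d) % 2 == 1) = true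
      · simp only [hc, if_pos]
        rw [foldl_step_out L es [d] (s₁ ++ [canon d]), foldl_step_out L es [d] (s₂ ++ [canon d])]
        exact ⟨by simp [h1], by simpa using h2⟩
      · simp only [hc, if_neg, Bool.false_eq_true, not_false_iff]
        exact ⟨h1, h2⟩

-- the fold depends on the counted list only through counts of unseen keys
lemma foldl_step_count_congr (L L' es : List (List (Int × Int)))
    (o : List (List (Int × Int))) (s : List ((Int × Int) × (Int × Int)))
    (h : ∀ k, k ∉ s → L.countP (fun e => canon e == k) = L'.countP (fun e => canon e == k)) :
    es.foldl (tikz_step L) (o, s) = es.foldl (tikz_step L') (o, s) := by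
  induction es generalizing o s with
  | nil => rfl
  | cons d es ih =>
    simp only [List.foldl_cons]
    by_cases hk : canon d ∈ s
    · rw [tikz_step_skip L (o, s) d hk, tikz_step_skip L' (o, s) d hk]
      exact ih o s h
    · rw [tikz_step_go L (o, s) d hk, tikz_step_go L' (o, s) d hk, h (canon d) hk]
      exact ih _ _ (fun k hk' => h k (fun hm => hk' (List.mem_append_left _ hm)))

-- every output element comes from es and has an unseen canon
lemma foldl_step_mem (L es : List (List (Int × Int))) (s : List ((Int × Int) × (Int × Int))) :
    ∀ e ∈ (es.foldl (tikz_step L) ([], s)).1, canon e ∉ s ∧ e ∈ es := by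
  induction es generalizing s with
  | nil => simp
  | cons d es ih =>
    intro e he
    simp only [List.foldl_cons] at he
    by_cases hk : canon d ∈ s
    · rw [tikz_step_skip L ([], s) d hk] at he
      obtain ⟨h1, h2⟩ := ih s e he
      exact ⟨h1, List.mem_cons_of_mem _ h2⟩
    · rw [tikz_step_go_nil L (s) d hk] at he
      by_cases hc : (L.countP (fun e => canon e == canon d) % 2 == 1) = true
      · simp only [hc, if_pos] at he
        rw [foldl_step_out L es [d] (s ++ [canon d])] at he
        rcases List.mem_append.mp he with hd | ht
        · rcases List.mem_singleton.mp hd with rfl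
          exact ⟨hk, List.mem_cons_self ..⟩
        · obtain ⟨h1, h2⟩ := ih (s ++ [canon d]) e ht
          exact ⟨fun hm => h1 (List.mem_append_left _ hm), List.mem_cons_of_mem _ h2⟩
      · simp only [hc, if_neg, Bool.false_eq_true, not_false_iff] at he
        obtain ⟨h1, h2⟩ := ih (s ++ [canon d]) e he
        exact ⟨fun hm => h1 (List.mem_append_left _ hm), List.mem_cons_of_mem _ h2⟩

-- at most one output element per canonical key
lemma foldl_step_countP_le (L es : List (List (Int × Int)))
    (s : List ((Int × Int) × (Int × Int))) (k : (Int × Int) × (Int × Int)) :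
    (es.foldl (tikz_step L) ([], s)).1.countP (fun e => canon e == k) ≤ 1 := by
  induction es generalizing s with
  | nil => simp
  | cons d es ih =>
    simp only [List.foldl_cons]
    by_cases hk : canon d ∈ s
    · rw [tikz_step_skip L ([], s) d hk]; exact ih s
    · rw [tikz_step_go_nil L (s) d hk]
      by_cases hc : (L.countP (fun e => canon e == canon d) % 2 == 1) = true
      · simp only [hc, if_pos]
        rw [foldl_step_out L es [d] (s ++ [canon d]), List.countP_append]
        by_cases hdk : canon d = k
        · have h0 : (es.foldl (tikz_step L) ([], s ++ [canon d])).1.countP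
              (fun e => canon e == k) = 0 := by
            rw [List.countP_eq_zero]
            intro e he
            have := (foldl_step_mem L es (s ++ [canon d]) e he).1
            simp only [beq_iff_eq]
            intro hek
            exact this (by simp [hdk, hek])
          have h1 : ([d].countP (fun e => canon e == k)) = 1 := by simp [hdk]
          rw [h0, h1]
        · have : ([d].countP (fun e => canon e == k)) = 0 := by
            simp [List.countP_nil, hdk]
          rw [this]
          simpa using ih (s ++ [canon d])
      · simp only [hc, if_neg, Bool.false_eq_true, not_false_iff]
        exact ih (s ++ [canon d])

-- a key is represented in the output iff it occurs in es and its count in L is odd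
lemma foldl_step_exists_iff (L es : List (List (Int × Int)))
    (s : List ((Int × Int) × (Int × Int))) (k : (Int × Int) × (Int × Int)) (hk : k ∉ s) :
    (∃ e ∈ (es.foldl (tikz_step L) ([], s)).1, canon e = k) ↔
      ((∃ d ∈ es, canon d = k) ∧ L.countP (fun e => canon e == k) % 2 = 1) := by
  induction es generalizing s with
  | nil => simp
  | cons d es ih =>
    simp only [List.foldl_cons]
    by_cases hkd : canon d ∈ s
    · rw [tikz_step_skip L ([], s) d hkd]
      rw [ih s hk]
      have hne : canon d ≠ k := fun h => hk (h ▸ hkd)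
      constructor
      · rintro ⟨⟨d', hd', hcd'⟩, hcnt⟩
        exact ⟨⟨d', List.mem_cons_of_mem _ hd', hcd'⟩, hcnt⟩
      · rintro ⟨⟨d', hd', hcd'⟩, hcnt⟩
        rcases List.mem_cons.mp hd' with rfl | hd't
        · exact absurd hcd' hne
        · exact ⟨⟨d', hd't, hcd'⟩, hcnt⟩
    · rw [tikz_step_go_nil L (s) d hkd]
      by_cases hdk : canon d = k
      · subst hdk
        by_cases hc : (L.countP (fun e => canon e == canon d) % 2 == 1) = true
        · simp only [hc, if_pos]
          rw [foldl_step_out L es [d] (s ++ [canon d])]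
          constructor
          · intro _
            exact ⟨⟨d, List.mem_cons_self .., rfl⟩, by simpa using hc⟩
          · intro _
            exact ⟨d, by simp⟩
        · simp only [hc, if_neg, Bool.false_eq_true, not_false_iff]
          constructor
          · rintro ⟨e, he, hek⟩
            have := (foldl_step_mem L es (s ++ [canon d]) e he).1
            exact absurd (by simp [hek]) this
          · rintro ⟨-, hcnt⟩
            exact absurd (by simpa using hcnt) (by simpa using hc)
      · have hks : k ∉ s ++ [canon d] := by
          intro hm
          rcases List.mem_append.mp hm with h | h
          · exact hk h
          · exact hdk (List.mem_singleton.mp h).symm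
        by_cases hc : (L.countP (fun e => canon e == canon d) % 2 == 1) = true
        · simp only [hc, if_pos]
          rw [foldl_step_out L es [d] (s ++ [canon d])]
          rw [show ((([d] : List (List (Int × Int))) ++
              (es.foldl (tikz_step L) ([], s ++ [canon d])).1, (es.foldl (tikz_step L) ([], s ++ [canon d])).2) : _ × _).1 =
              [d] ++ (es.foldl (tikz_step L) ([], s ++ [canon d])).1 from rfl]
          constructor
          · rintro ⟨e, he, hek⟩
            rcases List.mem_append.mp he with hd | ht
            · rcases List.mem_singleton.mp hd with rfl
              exact absurd hek hdk
            · obtain ⟨⟨d', hd', hcd'⟩, hcnt⟩ := (ih (s ++ [canon d]) hks).mp ⟨e, ht, hek⟩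
              exact ⟨⟨d', List.mem_cons_of_mem _ hd', hcd'⟩, hcnt⟩
          · rintro ⟨⟨d', hd', hcd'⟩, hcnt⟩
            have hd'es : d' ∈ es := by
              rcases List.mem_cons.mp hd' with rfl | h2
              · exact absurd hcd' hdk
              · exact h2
            obtain ⟨e, he, hek⟩ := (ih (s ++ [canon d]) hks).mpr ⟨⟨d', hd'es, hcd'⟩, hcnt⟩
            exact ⟨e, List.mem_append_right _ he, hek⟩
        · simp only [hc, if_neg, Bool.false_eq_true, not_false_iff]
          rw [ih (s ++ [canon d]) hks]
          constructor
          · rintro ⟨⟨d', hd', hcd'⟩, hcnt⟩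
            exact ⟨⟨d', List.mem_cons_of_mem _ hd', hcd'⟩, hcnt⟩
          · rintro ⟨⟨d', hd', hcd'⟩, hcnt⟩
            rcases List.mem_cons.mp hd' with rfl | h2
            · exact absurd hcd' hdk
            · exact ⟨⟨d', h2, hcd'⟩, hcnt⟩

-- pre-seeding a key k erases the k-element of the output
lemma foldl_step_seen_erase (L es : List (List (Int × Int)))
    (s : List ((Int × Int) × (Int × Int))) (k : (Int × Int) × (Int × Int)) (hk : k ∉ s) :
    (es.foldl (tikz_step L) ([], s ++ [k])).1 =
      ((es.foldl (tikz_step L) ([], s)).1).eraseP (fun e => canon e == k) := by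
  induction es generalizing s with
  | nil => simp
  | cons d es ih =>
    simp only [List.foldl_cons]
    by_cases hkd : canon d ∈ s
    · rw [tikz_step_skip L ([], s) d hkd,
          tikz_step_skip L ([], s ++ [k]) d (List.mem_append_left _ hkd)]
      exact ih s hk
    · by_cases hdk : canon d = k
      · subst hdk
        rw [tikz_step_skip L ([], s ++ [canon d]) d (by simp),
          tikz_step_go_nil L (s) d hkd]
        by_cases hc : (L.countP (fun e => canon e == canon d) % 2 == 1) = true
        · simp only [hc, if_pos]
          rw [foldl_step_out L es [d] (s ++ [canon d])]
          rw [show ((([d] : List (List (Int × Int))) ++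
              (es.foldl (tikz_step L) ([], s ++ [canon d])).1, (es.foldl (tikz_step L) ([], s ++ [canon d])).2) : _ × _).1 =
              d :: (es.foldl (tikz_step L) ([], s ++ [canon d])).1 from rfl]
          rw [List.eraseP_cons_of_pos (by simp)]
        · simp only [hc, if_neg, Bool.false_eq_true, not_false_iff]
          rw [List.eraseP_of_forall_not]
          intro e he
          have := (foldl_step_mem L es (s ++ [canon d]) e he).1
          simp only [beq_iff_eq]
          intro hek
          exact this (by simp [hek])
      · rw [tikz_step_go_nil L (s) d hkd,
            tikz_step_go_nil L (s ++ [k]) d (by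
              intro hm
              rcases List.mem_append.mp hm with h | h
              · exact hkd h
              · exact hdk (List.mem_singleton.mp h))]
        have hswap : ∀ x, x ∈ s ++ [k] ++ [canon d] ↔ x ∈ s ++ [canon d] ++ [k] := by
          intro x; simp; tauto
        have hout := (foldl_step_seen_congr L es (s ++ [k] ++ [canon d])
          (s ++ [canon d] ++ [k]) hswap).1
        have hk' : k ∉ s ++ [canon d] := by
          intro hm
          rcases List.mem_append.mp hm with h | h
          · exact hk h
          · exact hdk (List.mem_singleton.mp h).symm
        by_cases hc : (L.countP (fun e => canon e == canon d) % 2 == 1) = true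
        · simp only [hc, if_pos]
          rw [foldl_step_out L es [d] (s ++ [k] ++ [canon d]),
              foldl_step_out L es [d] (s ++ [canon d])]
          simp only [List.singleton_append]
          rw [List.eraseP_cons_of_neg (by simp [hdk])]
          rw [hout, ih (s ++ [canon d]) hk']
        · simp only [hc, if_neg, Bool.false_eq_true, not_false_iff]
          rw [hout, ih (s ++ [canon d]) hk']

lemma eraseP_eq_filter_of_countP_le_one {α : Type} (p : α → Bool) (l : List α)
    (h : l.countP p ≤ 1) : l.eraseP p = l.filter (fun e => !p e) := by
  induction l with
  | nil => simp
  | cons a t ih =>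
    by_cases hpa : p a = true
    · have h0 : t.countP p = 0 := by rw [List.countP_cons_of_pos hpa] at h; omega
      rw [List.eraseP_cons_of_pos hpa]
      simp [hpa]
      rw [List.filter_eq_self.mpr]
      intro b hb
      have := List.countP_eq_zero.mp h0 b hb
      simp [this]
    · have h1 : t.countP p ≤ 1 := le_trans (by rw [List.countP_cons]; omega) h
      simp [List.eraseP_cons_of_neg (by simpa using hpa), hpa, ih h1]

lemma countP_le_one_unique {α : Type} (p : α → Bool) (l : List α) (h : l.countP p ≤ 1)
    (a b : α) (ha : a ∈ l) (hb : b ∈ l) (hpa : p a) (hpb : p b) : a = b := by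
  by_contra hne
  induction l with
  | nil => simp at ha
  | cons c t ih =>
    rcases List.mem_cons.mp ha with rfl | hat
    · have hbt : b ∈ t := by
        rcases List.mem_cons.mp hb with rfl | h2
        · exact absurd rfl hne
        · exact h2
      have : 0 < t.countP p := List.countP_pos_iff.mpr ⟨b, hbt, hpb⟩
      rw [List.countP_cons_of_pos hpa] at h
      omega
    · rcases List.mem_cons.mp hb with rfl | hbt
      · have : 0 < t.countP p := List.countP_pos_iff.mpr ⟨a, hat, hpa⟩
        rw [List.countP_cons_of_pos hpb] at h
        omega
      · exact ih (le_trans (by rw [List.countP_cons]; omega) h) hat hbt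

lemma erase_eq_filter_of_unique (l : List (List (Int × Int))) (d : List (Int × Int))
    (k : (Int × Int) × (Int × Int)) (hPd : canon d = k)
    (h1 : l.countP (fun e => canon e == k) ≤ 1) (hd : d ∈ l) :
    l.erase d = l.filter (fun e => !(canon e == k)) := by
  induction l with
  | nil => simp
  | cons a t ih =>
    by_cases had : a = d
    · subst had
      rw [List.erase_cons_head]
      simp [hPd]
      have h0 : t.countP (fun e => canon e == k) = 0 := by
        rw [List.countP_cons_of_pos (by simp [hPd])] at h1; omega
      rw [List.filter_eq_self.mpr]
      intro b hb
      have := List.countP_eq_zero.mp h0 b hb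
      simpa using this
    · have hPa : ¬ (canon a = k) := by
        intro hca
        have hdt : d ∈ t := by
          rcases List.mem_cons.mp hd with rfl | h2
          · exact absurd rfl had
          · exact h2
        exact had (countP_le_one_unique _ _ h1 a d (List.mem_cons_self ..)
          (List.mem_cons_of_mem _ hdt) (by simp [hca]) (by simp [hPd]))
      have hdt : d ∈ t := by
        rcases List.mem_cons.mp hd with rfl | h2
        · exact absurd rfl had
        · exact h2
      rw [List.erase_cons]
      simp only [beq_iff_eq, if_neg had]
      simp [hPa]
      exact ih (le_trans (by rw [List.countP_cons]; omega) h1) hdt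

lemma canon_reverse (p q : Int × Int) : canon [q, p] = canon [p, q] := by
  obtain ⟨p1, p2⟩ := p
  obtain ⟨q1, q2⟩ := q
  simp only [canon]
  split_ifs with h1 h2 h2
  · obtain rfl : q1 = p1 := by omega
    obtain rfl : q2 = p2 := by omega
    rfl
  · rfl
  · rfl
  · exfalso; omega

lemma canon_eq_cases (p q r s : Int × Int) (h : canon [p, q] = canon [r, s]) :
    ([p, q] : List (Int × Int)) = [r, s] ∨ ([p, q] : List (Int × Int)) = [s, r] := by
  have h1 : canon [p, q] = (p, q) ∨ canon [p, q] = (q, p) := by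
    simp only [canon]; split_ifs <;> simp
  have h2 : canon [r, s] = (r, s) ∨ canon [r, s] = (s, r) := by
    simp only [canon]; split_ifs <;> simp
  rcases h1 with h1 | h1 <;> rcases h2 with h2 | h2 <;>
    rw [h1, h2] at h <;>
    [left; right; right; left] <;>
    simp [Prod.ext_iff] at h ⊢ <;> tauto

lemma tikz_box_eq_foldl_flatMap (coordinates : List (Int × Int)) :
    tikz_box coordinates = (coordinates.flatMap box_coords).foldl tikz_toggle [] := by
  unfold tikz_box
  generalize ([] : List (List (Int × Int))) = init
  induction coordinates generalizing init with
  | nil => rfl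
  | cons c cs ih => simp [List.flatMap_cons, List.foldl_append, ih]

lemma shape_flatMap (coordinates : List (Int × Int)) :
    ∀ e ∈ coordinates.flatMap box_coords, ∃ p q, e = [p, q] := by
  intro e he
  rcases List.mem_flatMap.mp he with ⟨c, _, hmem⟩
  simp only [box_coords, List.mem_cons] at hmem
  rcases hmem with rfl | rfl | rfl | rfl | h
  · exact ⟨_, _, rfl⟩
  · exact ⟨_, _, rfl⟩
  · exact ⟨_, _, rfl⟩
  · exact ⟨_, _, rfl⟩
  · simp at h

lemma main_key : ∀ (E : List (List (Int × Int))), (∀ e ∈ E, ∃ p q, e = [p, q]) →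
    E.foldl tikz_toggle [] = ((E.reverse.foldl (tikz_step E) ([], [])).1).reverse := by
  intro E
  induction E using List.reverseRecOn with
  | nil => intro _; rfl
  | append_singleton E d ih =>
    intro hE
    have hE' : ∀ e ∈ E, ∃ p q, e = [p, q] := fun e he => hE e (List.mem_append_left _ he)
    obtain ⟨p, q, rfl⟩ := hE d (List.mem_append_right _ (by simp))
    rw [List.foldl_append, List.foldl_cons, List.foldl_nil, ih hE']
    rw [List.reverse_append]
    simp only [List.reverse_cons, List.reverse_nil, List.nil_append, List.singleton_append,
      List.foldl_cons]
    rw [tikz_step_go_nil (E ++ [[p, q]]) [] [p, q] (by simp)]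
    have hcnt1 : (E ++ [[p, q]]).countP (fun e => canon e == canon [p, q]) =
        E.countP (fun e => canon e == canon [p, q]) + 1 := by
      rw [List.countP_append]; simp
    rw [hcnt1]
    simp only [List.nil_append]
    have hLsw : ∀ o : List (List (Int × Int)),
        E.reverse.foldl (tikz_step (E ++ [[p, q]])) (o, [canon [p, q]]) =
        E.reverse.foldl (tikz_step E) (o, [canon [p, q]]) := by
      intro o
      refine foldl_step_count_congr _ _ _ _ _ ?_
      intro k' hk'
      rw [List.countP_append]
      have h0 : ([[p, q]] : List (List (Int × Int))).countP (fun e => canon e == k') = 0 := by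
        simp only [List.countP_cons, List.countP_nil]
        have : ¬(canon [p, q] = k') := fun h => hk' (by simp [h])
        simp [this]
      omega
    have her := foldl_step_seen_erase E E.reverse [] (canon [p, q]) (by simp)
    simp only [List.nil_append] at her
    have hcount1 := foldl_step_countP_le E E.reverse [] (canon [p, q])
    have hex := foldl_step_exists_iff E E.reverse [] (canon [p, q]) (by simp)
    rcases Nat.mod_two_eq_zero_or_one (E.countP (fun e => canon e == canon [p, q]))
      with hpar | hpar
    · -- even parity in E: the new edge is appended
      have hif : ((E.countP (fun e => canon e == canon [p, q]) + 1) % 2 == 1) = true := by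
        simp only [beq_iff_eq]; omega
      rw [if_pos hif, hLsw, foldl_step_out E E.reverse [[p, q]] [canon [p, q]], her]
      have hno : ∀ e ∈ (E.reverse.foldl (tikz_step E) ([], [])).1,
          ¬((fun e => canon e == canon [p, q]) e = true) := by
        intro e he hbe
        have hodd := (hex.mp ⟨e, he, by simpa using hbe⟩).2
        omega
      rw [List.eraseP_of_forall_not hno]
      have hmem1 : ([p, q] : List (Int × Int)) ∉
          (E.reverse.foldl (tikz_step E) ([], [])).1.reverse := by
        intro hm
        exact hno _ (List.mem_reverse.mp hm) (by simp)
      have hmem2 : ([q, p] : List (Int × Int)) ∉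
          (E.reverse.foldl (tikz_step E) ([], [])).1.reverse := by
        intro hm
        exact hno _ (List.mem_reverse.mp hm) (by simp [canon_reverse])
      unfold tikz_toggle
      rw [if_neg (by
        rintro (h1 | h2)
        · exact hmem1 h1
        · rw [show ([p, q] : List (Int × Int)).reverse = [q, p] by simp] at h2
          exact hmem2 h2)]
      simp
    · -- odd parity in E: the matching edge is removed
      have hif : ¬(((E.countP (fun e => canon e == canon [p, q]) + 1) % 2 == 1) = true) := by
        simp only [beq_iff_eq]; omega
      rw [if_neg hif, hLsw, foldl_step_out E E.reverse [] [canon [p, q]], her]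
      simp only [List.nil_append]
      -- there is a (unique) element with the same canon in the accumulated output
      have hpos : 0 < E.countP (fun e => canon e == canon [p, q]) := by omega
      obtain ⟨e0, he0, hpe0⟩ := List.countP_pos_iff.mp hpos
      obtain ⟨e, he, hek⟩ := hex.mpr ⟨⟨e0, by simpa using he0, by simpa using hpe0⟩, hpar⟩
      have heE : e ∈ E := List.mem_reverse.mp (foldl_step_mem E E.reverse [] e he).2
      obtain ⟨r, s', rfl⟩ := hE' e heE
      have hBcount : (List.foldl (tikz_step E) ([], []) E.reverse).1.reverse.countP
          (fun e => canon e == canon [p, q]) ≤ 1 := by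
        rw [List.countP_reverse]; exact hcount1
      have hfeq : (List.eraseP (fun e => canon e == canon [p, q])
            (List.foldl (tikz_step E) ([], []) E.reverse).1).reverse =
          (List.foldl (tikz_step E) ([], []) E.reverse).1.reverse.filter
            (fun e => !(canon e == canon [p, q])) := by
        rw [eraseP_eq_filter_of_countP_le_one _ _ hcount1, ← List.filter_reverse]
      unfold tikz_toggle
      by_cases hpq : ([p, q] : List (Int × Int)) ∈
          (List.foldl (tikz_step E) ([], []) E.reverse).1.reverse
      · rw [if_pos (Or.inl hpq), if_pos hpq, hfeq,
          erase_eq_filter_of_unique _ [p, q] (canon [p, q]) rfl hBcount hpq]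
      · have heB : ([q, p] : List (Int × Int)) ∈
            (List.foldl (tikz_step E) ([], []) E.reverse).1.reverse := by
          rcases canon_eq_cases r s' p q hek with h1 | h1
          · exact absurd (h1 ▸ List.mem_reverse.mpr he) hpq
          · exact h1 ▸ List.mem_reverse.mpr he
        rw [show ([p, q] : List (Int × Int)).reverse = [q, p] by simp]
        rw [if_pos (Or.inr heB), if_neg hpq, hfeq,
          erase_eq_filter_of_unique _ [q, p] (canon [p, q]) (canon_reverse p q) hBcount heB]

-- ===== VERDICT (by name: the statement is the Claim_ definition above) =====
theorem tikz_box_spec : Claim_equal_tikz_box := by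
  intro coords _
  unfold Spec_tikz_box tikz_box_alt
  rw [tikz_box_eq_foldl_flatMap, main_key _ (shape_flatMap coords)]
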